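-- pv_equiv track=rewrite | github.com/isaac-0414/IsaacGPT | utils/process_md.py | format_md
-- ===== SOURCE A (Python) =====
-- def format_md(md: str):
--     """
--     Remove special characters and spaces at the beginning and end of line
--
--     Parameters:
--     md (str): the input markdown doc
--
--     Returns:
--     str: processed markdown
--     """
--     lines = md.split('\n')
--     for i in range(1, len(lines)):
--         lines[i] = lines[i].strip()
--         specials = [']', ')', '>', ',', '.', ';', ':']
--         while len(lines[i]) > 0 and lines[i][0] in specials:
--             lines[i-1] += ' ' + lines[i][0]
--             lines[i] = lines[i][1:]
--             lines[i] = lines[i].strip()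
--     return '\n'.join(lines)
-- ===== SOURCE B (Python) =====
-- def format_md(md: str):
--     """Remove edge whitespace per line and move leading special chars to the previous line."""
--     SPECIALS = "])>,.;:"
--     lines = md.split('\n')
--     out = [lines[0]]
--     for line in lines[1:]:
--         s = line.strip()
--         pulled = []
--         j = 0
--         while j < len(s):
--             c = s[j]
--             if c in SPECIALS:
--                 pulled.append(c)
--                 j += 1
--             elif c.isspace():
--                 j += 1
--             else:
--                 break
--         out[-1] += ''.join(' ' + c for c in pulled)
--         out.append(s[j:])
--     return '\n'.join(out)
-- ===== Notes on version B (the rewrite author's own statement) =====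
-- stated objective: simpler
-- what changed: B replaces A's repeated destructive slicing+re-stripping of each line (a while loop that rewrites the line string every step) with a single forward index scan that collects the pulled specials into a list, then assembles the output lines in one pass.
import Mathlib
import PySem

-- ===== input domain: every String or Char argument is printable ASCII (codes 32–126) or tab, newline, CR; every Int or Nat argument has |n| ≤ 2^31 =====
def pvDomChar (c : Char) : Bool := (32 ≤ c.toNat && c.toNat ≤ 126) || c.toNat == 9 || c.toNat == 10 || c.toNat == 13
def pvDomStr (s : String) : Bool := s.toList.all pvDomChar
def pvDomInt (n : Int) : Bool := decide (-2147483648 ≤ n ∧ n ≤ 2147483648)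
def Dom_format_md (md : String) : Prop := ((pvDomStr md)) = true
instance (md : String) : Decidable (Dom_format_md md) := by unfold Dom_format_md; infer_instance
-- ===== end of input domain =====

-- B changes structure only: one forward scan collecting the pulled specials, then one assembly pass (no claim of speed).

-- ===== PORT A =====
def pvSpecials : List Char := [']', ')', '>', ',', '.', ';', ':']

-- needed by wsA's decreasing_by
theorem pvStripLen (cs : List Char) : (PySem.Chars.strip cs).length ≤ cs.length := by
  unfold PySem.Chars.strip PySem.Chars.rstrip PySem.Chars.lstrip
  simp only [List.length_reverse]
  exact le_trans (List.length_dropWhile_le _ _)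
    (by simpa using List.length_dropWhile_le (fun c => PySem.Chars.isspace c) cs)

-- A's inner while loop: consume a leading special, append ' '+c to the previous line, re-strip
def wsA (prev cur : List Char) : List Char × List Char :=
  match cur with
  | [] => (prev, [])
  | c :: rest =>
    if c ∈ pvSpecials then wsA (prev ++ [' ', c]) (PySem.Chars.strip rest)
    else (prev, c :: rest)
termination_by cur.length
decreasing_by simpa using Nat.lt_succ_of_le (pvStripLen rest)

-- A's for loop over indices 1..len-1, carrying the previous (already processed) line
def loopA (done : List (List Char)) (p : List Char) : List (List Char) → List (List Char)
  | [] => (p :: done).reverse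
  | l :: ls =>
    let r := wsA p (PySem.Chars.strip l)
    loopA (r.1 :: done) r.2 ls

def format_md (md : String) : String :=
  match PySem.Chars.splitOn md.toList ['\n'] with
  | [] => ""
  | l :: ls => String.ofList (PySem.Chars.join ['\n'] (loopA [] l ls))

-- ===== PORT B =====
-- B's forward scan: collect leading specials (skipping interleaved whitespace), return (pulled, tail)
def pullB : List Char → List Char × List Char
  | [] => ([], [])
  | c :: rest =>
    if c ∈ pvSpecials then
      let r := pullB rest
      (c :: r.1, r.2)
    else if PySem.Chars.isspace c then pullB rest
    else ([], c :: rest)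

-- B's assembly pass: previous line gains ' '+c per pulled special, current line becomes the tail
def buildB (prev : List Char) : List (List Char) → List (List Char)
  | [] => [prev]
  | l :: ls =>
    let r := pullB (PySem.Chars.strip l)
    (prev ++ r.1.flatMap (fun c => [' ', c])) :: buildB r.2 ls

def format_md_alt (md : String) : String :=
  match PySem.Chars.splitOn md.toList ['\n'] with
  | [] => ""
  | l :: ls => String.ofList (PySem.Chars.join ['\n'] (buildB l ls))

-- ===== PRECONDITION & SPEC =====
def Spec_format_md (md : String) (out : String) : Prop := out = format_md_alt md
instance (md : String) (out : String) : Decidable (Spec_format_md md out) := by unfold Spec_format_md; infer_instance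

-- ===== CLAIM (what is proved, stated in full; the proofs are below) =====
def Claim_equal_format_md : Prop := ∀ (md : String), Dom_format_md md → Spec_format_md md (format_md md)

-- ===== LEMMAS AND PROOFS =====

def NoWsHead (cs : List Char) : Prop := ∀ c, cs.head? = some c → PySem.Chars.isspace c = false
def NoWsLast (cs : List Char) : Prop := ∀ c, cs.getLast? = some c → PySem.Chars.isspace c = false

theorem spec_not_ws {c : Char} (h : c ∈ pvSpecials) : PySem.Chars.isspace c = false := by
  fin_cases h <;> decide

theorem pullB_dropWhile (cs : List Char) :
    pullB (List.dropWhile PySem.Chars.isspace cs) = pullB cs := by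
  induction cs with
  | nil => rfl
  | cons c rest ih =>
    by_cases hw : PySem.Chars.isspace c
    · have hs : c ∉ pvSpecials := fun h => by simp [spec_not_ws h] at hw
      simp [hw, pullB, hs, ih]
    · simp [hw, pullB]

theorem noWsHead_dropWhile (cs : List Char) :
    NoWsHead (List.dropWhile PySem.Chars.isspace cs) := by
  induction cs with
  | nil => intro c h; simp at h
  | cons c rest ih =>
    by_cases hw : PySem.Chars.isspace c
    · simpa [hw] using ih
    · intro d hd
      simp [hw] at hd
      subst hd
      simpa using hw

theorem dropWhile_eq_self_of_noWsHead {cs : List Char} (h : NoWsHead cs) :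
    List.dropWhile PySem.Chars.isspace cs = cs := by
  cases cs with
  | nil => rfl
  | cons c rest => simp [h c rfl]

theorem noWsLast_tail {c : Char} {rest : List Char} (h : NoWsLast (c :: rest)) :
    NoWsLast rest := by
  cases rest with
  | nil => intro d hd; simp at hd
  | cons x xs => intro d hd; exact h d (by rw [List.getLast?_cons_cons]; exact hd)

theorem noWsLast_dropWhile {cs : List Char} (h : NoWsLast cs) :
    NoWsLast (List.dropWhile PySem.Chars.isspace cs) := by
  intro d hd
  obtain ⟨t, ht⟩ := (List.dropWhile_suffix (l := cs) (p := PySem.Chars.isspace))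
  apply h d
  rw [← ht, List.getLast?_append]
  simp [hd]

theorem noWsHead_rstrip {l : List Char} (h : NoWsHead l) :
    NoWsHead (PySem.Chars.rstrip l) := by
  intro d hd
  have hp : PySem.Chars.rstrip l <+: l := by
    unfold PySem.Chars.rstrip
    rw [← List.reverse_reverse l]
    exact (List.reverse_prefix).mpr (by simpa using List.dropWhile_suffix _)
  obtain ⟨t, ht⟩ := hp
  apply h d
  rw [← ht, List.head?_append]
  simp [hd]

theorem noWsLast_rstrip (l : List Char) : NoWsLast (PySem.Chars.rstrip l) := by
  intro d hd
  unfold PySem.Chars.rstrip at hd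
  rw [List.getLast?_reverse] at hd
  exact noWsHead_dropWhile l.reverse d hd

theorem noWsHead_strip (x : List Char) : NoWsHead (PySem.Chars.strip x) :=
  noWsHead_rstrip (noWsHead_dropWhile x)

theorem noWsLast_strip (x : List Char) : NoWsLast (PySem.Chars.strip x) :=
  noWsLast_rstrip _

theorem strip_of_noWsLast {cs : List Char} (h : NoWsLast cs) :
    PySem.Chars.strip cs = List.dropWhile PySem.Chars.isspace cs := by
  unfold PySem.Chars.strip PySem.Chars.lstrip PySem.Chars.rstrip
  have h2 : NoWsLast (List.dropWhile PySem.Chars.isspace cs) := noWsLast_dropWhile h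
  have h3 : NoWsHead (List.dropWhile PySem.Chars.isspace cs).reverse := by
    intro d hd; exact h2 d (by rwa [List.head?_reverse] at hd)
  rw [dropWhile_eq_self_of_noWsHead h3, List.reverse_reverse]

theorem wsA_eq_aux : ∀ (n : ℕ) (cs : List Char), cs.length ≤ n → NoWsHead cs → NoWsLast cs →
    ∀ prev, wsA prev cs =
      (prev ++ (pullB cs).1.flatMap (fun c => [' ', c]), (pullB cs).2) := by
  intro n
  induction n with
  | zero =>
    intro cs hn _ _ prev
    have : cs = [] := List.eq_nil_of_length_eq_zero (Nat.le_zero.mp hn)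
    subst this; simp [wsA, pullB]
  | succ n ih =>
    intro cs hn hh hl prev
    cases cs with
    | nil => simp [wsA, pullB]
    | cons c rest =>
      by_cases hc : c ∈ pvSpecials
      · have hlr : NoWsLast rest := noWsLast_tail hl
        have hstrip : PySem.Chars.strip rest = List.dropWhile PySem.Chars.isspace rest :=
          strip_of_noWsLast hlr
        have hlen : (PySem.Chars.strip rest).length ≤ n := by
          have h1 := pvStripLen rest
          simp only [List.length_cons] at hn
          omega
        have hrec := ih (PySem.Chars.strip rest) hlen (noWsHead_strip rest) (noWsLast_strip rest)
          (prev ++ [' ', c])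
        have hpb : pullB (PySem.Chars.strip rest) = pullB rest := by
          rw [hstrip]; exact pullB_dropWhile rest
        rw [hpb] at hrec
        have h1 : wsA prev (c :: rest) = wsA (prev ++ [' ', c]) (PySem.Chars.strip rest) := by
          rw [wsA]; simp [hc]
        have h2 : pullB (c :: rest) = (c :: (pullB rest).1, (pullB rest).2) := by
          simp [pullB, hc]
        rw [h1, hrec, h2]
        simp
      · have hwc : PySem.Chars.isspace c = false := hh c rfl
        rw [wsA]
        simp [hc, pullB, hwc]

theorem wsA_eq (cs : List Char) (hh : NoWsHead cs) (hl : NoWsLast cs) (prev : List Char) :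
    wsA prev cs = (prev ++ (pullB cs).1.flatMap (fun c => [' ', c]), (pullB cs).2) :=
  wsA_eq_aux cs.length cs le_rfl hh hl prev

theorem loopA_eq (rest : List (List Char)) : ∀ (done : List (List Char)) (p : List Char),
    loopA done p rest = done.reverse ++ buildB p rest := by
  induction rest with
  | nil => intro done p; simp [loopA, buildB]
  | cons l ls ih =>
    intro done p
    simp only [loopA, buildB]
    rw [wsA_eq (PySem.Chars.strip l) (noWsHead_strip l) (noWsLast_strip l) p, ih]
    simp

-- ===== VERDICT (by name: the statement is the Claim_ definition above) =====
theorem format_md_spec : Claim_equal_format_md := by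
  unfold Claim_equal_format_md Spec_format_md
  intro md _
  unfold format_md format_md_alt
  cases h : PySem.Chars.splitOn md.toList ['\n'] with
  | nil => simp
  | cons l ls => simp [loopA_eq ls [] l]
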